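-- pv_equiv track=rewrite | github.com/b000rindza/PublicStuff | prob2mod_f2.py | overlapOne
-- ===== SOURCE A (Python) =====
-- def overlapOne(row_inds, mat):
--
-- 	N = len(mat[0])
--
-- 	res = []
--
-- 	for i in range(max(row_inds)+1, N): # checking if the listed rows overlap at greater indeces
--
-- 		match = True
-- 		for r in row_inds:
-- 			if mat[r][i] == False:
-- 				match = False
-- 				break
-- 		if match:
-- 			res.append(i)
--
--
--
-- 	return res
-- ===== SOURCE B (Python) =====
-- def overlapOne(row_inds, mat):
--     # Set-intersection decomposition: per listed row, the set of True columns
--     # past max(row_inds); intersect them all, return in ascending order.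
--     N = len(mat[0])
--     start = max(row_inds) + 1
--     cols = set(range(start, N))
--     for r in row_inds:
--         trues = {i for i in range(start, N) if mat[r][i] != False}
--         cols = cols & trues
--     return sorted(cols)
-- ===== Notes on version B (the rewrite author's own statement) =====
-- stated objective: alternative
-- what changed: B replaces A's nested column-then-row loop with early break and append by building, per listed row, the set of True columns past max(row_inds), intersecting these sets, and returning the intersection sorted.
-- outside the precondition, e.g. on overlapOne([0, 1], [[True, False, False, False], [False]]): A returns [], B raises IndexError; on overlapOne([0, 2], [[True, False, False, False]]): A returns [], B raises IndexError
import Mathlib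
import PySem

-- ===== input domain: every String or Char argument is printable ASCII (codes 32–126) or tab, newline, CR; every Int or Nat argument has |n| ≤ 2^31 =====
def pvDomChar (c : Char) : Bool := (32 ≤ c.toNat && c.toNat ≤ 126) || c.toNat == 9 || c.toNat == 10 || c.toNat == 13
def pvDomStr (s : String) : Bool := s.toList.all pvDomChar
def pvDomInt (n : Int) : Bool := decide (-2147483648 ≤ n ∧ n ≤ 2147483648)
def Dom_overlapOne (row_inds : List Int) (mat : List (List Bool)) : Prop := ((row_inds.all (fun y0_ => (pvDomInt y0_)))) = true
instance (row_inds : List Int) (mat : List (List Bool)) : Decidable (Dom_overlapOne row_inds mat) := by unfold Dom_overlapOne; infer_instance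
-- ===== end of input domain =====

-- B's objective: an alternative decomposition — per-row sets of True columns intersected,
-- then sorted — instead of A's nested loop with early break; same exact results on Pre_.

-- ===== PORT A =====
-- mat[r][i] (total form; Pre_ keeps every access Python performs in range)
def pvCell (mat : List (List Bool)) (r i : Int) : Bool :=
  PySem.List.pyGetD (PySem.List.pyGetD mat r []) i false

-- the inner 'for r in row_inds: if mat[r][i] == False: match = False; break'
def overlapOneCheck (mat : List (List Bool)) (i : Int) : List Int → Bool
  | [] => true
  | r :: rest => if pvCell mat r i == false then false else overlapOneCheck mat i rest

def overlapOne (row_inds : List Int) (mat : List (List Bool)) : List Int :=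
  let N : Int := PySem.List.len (PySem.List.pyGetD mat 0 [])
  (PySem.List.pyRange ((PySem.List.max? row_inds (fun x => x)).getD 0 + 1) N 1).foldl
    (fun res i => if overlapOneCheck mat i row_inds then res ++ [i] else res) []

-- ===== PORT B =====
def overlapOne_alt (row_inds : List Int) (mat : List (List Bool)) : List Int :=
  let N : Int := PySem.List.len (PySem.List.pyGetD mat 0 [])
  let start : Int := (PySem.List.max? row_inds (fun x => x)).getD 0 + 1
  let cols0 : PySem.Set Int := PySem.Set.ofList (PySem.List.pyRange start N 1)
  let cols := row_inds.foldl
    (fun cols r => PySem.Set.inter cols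
      (PySem.Set.ofList ((PySem.List.pyRange start N 1).filter (fun i => pvCell mat r i != false)))) cols0
  PySem.List.sorted cols (fun x => x)

-- ===== PRECONDITION & SPEC =====
-- Pre_ excludes the raising inputs (empty row_inds: ValueError; empty mat: IndexError) and,
-- when the column loop is nonempty, requires every listed row index to be a valid index into mat
-- and every listed row to have at least len(mat[0]) columns: on the excluded ragged or
-- out-of-range-row inputs, whether A returns [] or raises IndexError is decided by its early
-- break, while B's set builder touches every listed row over the whole column range and raises
-- IndexError there.
def Pre_overlapOne (row_inds : List Int) (mat : List (List Bool)) : Prop :=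
  row_inds ≠ [] ∧ mat ≠ [] ∧
  ((PySem.List.max? row_inds (fun x => x)).getD 0 + 1 < PySem.List.len (PySem.List.pyGetD mat 0 []) →
    ∀ r ∈ row_inds, PySem.Raise.InRange mat.length r ∧
      (PySem.List.pyGetD mat 0 []).length ≤ ((PySem.List.pyGet? mat r).getD []).length)
instance (row_inds : List Int) (mat : List (List Bool)) : Decidable (Pre_overlapOne row_inds mat) := by
  unfold Pre_overlapOne; infer_instance

def pvWitness_overlapOne : List Int × List (List Bool) := ([0], [[true, false, true]])

def Spec_overlapOne (row_inds : List Int) (mat : List (List Bool)) (out : List Int) : Prop := out = overlapOne_alt row_inds mat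
instance (row_inds : List Int) (mat : List (List Bool)) (out : List Int) : Decidable (Spec_overlapOne row_inds mat out) := by unfold Spec_overlapOne; infer_instance

-- ===== CLAIM (what is proved, stated in full; the proofs are below) =====
def Claim_equal_overlapOne : Prop := ∀ (row_inds : List Int) (mat : List (List Bool)), Dom_overlapOne row_inds mat → Pre_overlapOne row_inds mat → Spec_overlapOne row_inds mat (overlapOne row_inds mat)

-- ===== LEMMAS AND PROOFS =====

-- A's inner break-loop is the conjunction over row_inds
theorem overlapOneCheck_eq_all (mat : List (List Bool)) (i : Int) :
    ∀ rs : List Int, overlapOneCheck mat i rs = rs.all (fun r => pvCell mat r i)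
  | [] => rfl
  | r :: rest => by
    cases h : pvCell mat r i <;>
      simp [overlapOneCheck, h, overlapOneCheck_eq_all mat i rest]

-- B's intersection fold is a filter by the same conjunction
theorem pv_fold_inter (mat : List (List Bool)) (st N : Int) :
    ∀ (rs : List Int) (s : List Int), (∀ i ∈ s, i ∈ PySem.List.pyRange st N 1) →
      rs.foldl
        (fun cols r => PySem.Set.inter cols
          (PySem.Set.ofList ((PySem.List.pyRange st N 1).filter (fun i => pvCell mat r i != false)))) s
      = s.filter (fun i => rs.all (fun r => pvCell mat r i))
  | [], s, _ => by simp
  | r :: rest, s, hs => by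
    simp only [List.foldl_cons]
    have hstep : PySem.Set.inter s
        (PySem.Set.ofList ((PySem.List.pyRange st N 1).filter (fun i => pvCell mat r i != false)))
        = s.filter (fun i => pvCell mat r i) := by
      simp only [PySem.Set.inter]
      apply List.filter_congr
      intro i hi
      rw [Bool.eq_iff_iff]
      simp [PySem.Set.mem_ofList, List.mem_filter, hs i hi]
    rw [hstep,
      pv_fold_inter mat st N rest _ (fun i hi => hs i (List.mem_of_mem_filter hi)),
      List.filter_filter]
    apply List.filter_congr
    intro i _
    cases h : pvCell mat r i <;> simp [h]

-- ===== VERDICT (by name: the statement is the Claim_ definition above) =====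
theorem overlapOne_spec : Claim_equal_overlapOne := by
  intro row_inds mat _ _
  unfold Spec_overlapOne overlapOne overlapOne_alt
  simp only []
  rw [PySem.List.foldl_append_if_eq_filter, List.nil_append,
    PySem.Set.ofList_eq_self_of_nodup _ (PySem.List.nodup_pyRange_one _ _),
    pv_fold_inter _ _ _ _ _ (fun i hi => hi),
    PySem.List.sorted_eq_self_of_pairwise _ _
      (((PySem.List.pairwise_lt_pyRange_one _ _).filter _).imp (fun h => le_of_lt h))]
  apply List.filter_congr
  intro i _
  rw [overlapOneCheck_eq_all]
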